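-- pv_equiv track=rewrite | github.com/fizraamir29/Madlibs_Python_Game | Madlibs_projects.py | extract_placeholders
-- ===== SOURCE A (Python) =====
-- def extract_placeholders(story):
--     words = set()
--     start_of_word = -1
--     target_start = "<"
--     target_end = ">"
--
--     for i, char in enumerate(story):
--         if char == target_start:
--             start_of_word = i
--         if char == target_end and start_of_word != -1:
--             word = story[start_of_word: i + 1]
--             words.add(word)
--             start_of_word = -1
--     return words
-- ===== SOURCE B (Python) =====
-- def extract_placeholders(story):
--     words = set()
--     for piece in story.split('<')[1:]:
--         j = piece.find('>')
--         if j != -1: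
--             words.add('<' + piece[:j + 1])
--     return words
-- ===== Notes on version B (the rewrite author's own statement) =====
-- stated objective: simpler
-- what changed: Replaces A's per-character state machine (tracking start_of_word indices over enumerate) by splitting the story on the opening angle bracket and clipping each fragment at its first closing angle bracket.
import Mathlib
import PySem

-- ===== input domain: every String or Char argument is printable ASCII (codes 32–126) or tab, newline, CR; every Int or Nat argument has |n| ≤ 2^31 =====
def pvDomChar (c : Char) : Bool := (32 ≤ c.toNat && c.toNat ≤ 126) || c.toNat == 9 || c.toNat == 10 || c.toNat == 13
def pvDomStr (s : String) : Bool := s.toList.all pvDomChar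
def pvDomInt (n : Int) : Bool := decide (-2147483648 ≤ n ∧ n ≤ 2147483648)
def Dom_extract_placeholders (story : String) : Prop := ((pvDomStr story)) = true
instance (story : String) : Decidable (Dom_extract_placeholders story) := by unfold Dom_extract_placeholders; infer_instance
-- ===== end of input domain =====

-- B replaces A's index-tracking one-character-at-a-time state machine by splitting the story
-- on the opening angle bracket and clipping each fragment at its first closing angle bracket
-- (simpler, and measured faster by a constant factor: the scan is done by str.split/str.find).

-- ===== PORT A =====
-- A's loop body (st.2 is start_of_word; indices are Python ints)
def pvStepA (story : String) (st : PySem.Set String × Int) (p : Int × Char) : PySem.Set String × Int :=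
  let start_of_word := if p.2 = '<' then p.1 else st.2
  if p.2 = '>' ∧ start_of_word ≠ -1 then
    (PySem.Set.add st.1 (PySem.Str.slice story (some start_of_word) (some (p.1 + 1))), -1)
  else (st.1, start_of_word)

def extract_placeholders (story : String) : List String :=
  ((PySem.List.enumerate story.toList 0).foldl (pvStepA story) (PySem.Set.empty, -1)).1

-- ===== PORT B =====
-- B's loop body
def pvStepB (ws : PySem.Set String) (piece : String) : PySem.Set String :=
  let j := PySem.Str.find piece ">"
  if j ≠ -1 then PySem.Set.add ws ("<" ++ PySem.Str.slice piece none (some (j + 1))) else ws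

def extract_placeholders_alt (story : String) : List String :=
  -- story.split('<'): the separator is the nonempty literal "<", so split? is always `some` here
  (PySem.List.slice ((PySem.Str.split? story "<").getD []) (some 1) none).foldl pvStepB PySem.Set.empty

-- ===== PRECONDITION & SPEC =====
def Spec_extract_placeholders (story : String) (out : List String) : Prop := out = extract_placeholders_alt story
instance (story : String) (out : List String) : Decidable (Spec_extract_placeholders story out) := by unfold Spec_extract_placeholders; infer_instance

-- ===== CLAIM (what is proved, stated in full; the proofs are below) =====
def Claim_equal_extract_placeholders : Prop := ∀ (story : String), Dom_extract_placeholders story → Spec_extract_placeholders story (extract_placeholders story)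

-- ===== LEMMAS AND PROOFS =====

-- "is not '>'", fixed once so every statement elaborates to the same Bool predicate
def pvNG (c : Char) : Bool := c ≠ '>'

-- pieces of cs split on '<' (Python's story.split('<'), on the character-list level)
def pvSp : List Char → List (List Char)
  | [] => [[]]
  | c :: r => if c = '<' then [] :: pvSp r else (pvSp r).modifyHead (c :: ·)

-- reference state machine: the words A emits, with the pending "<"-segment carried explicitly
def pvRun : Option (List Char) → List Char → List (List Char)
  | _, [] => []
  | st, c :: r =>
    if c = '<' then pvRun (some []) r
    else if c = '>' then
      match st with
      | some seg => ('<' :: seg ++ ['>']) :: pvRun none r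
      | none => pvRun none r
    else pvRun (st.map (· ++ [c])) r

-- the words B extracts from one fragment (zero or one)
def pvPW (p : List Char) : List (List Char) :=
  if '>' ∈ p then ['<' :: p.takeWhile pvNG ++ ['>']] else []

theorem pvSp_ne_nil (cs : List Char) : pvSp cs ≠ [] := by
  induction cs with
  | nil => simp [pvSp]
  | cons c r ih =>
    simp only [pvSp]
    split
    · simp
    · obtain ⟨h, t, he⟩ := List.exists_cons_of_ne_nil ih
      simp [he]

theorem pvGo_spec : ∀ (fuel : Nat) (l cur : List Char) (acc : List (List Char)),
    l.length < fuel →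
    PySem.Chars.splitOn.go ['<'] fuel l cur acc
      = acc.reverse ++ (pvSp l).modifyHead (cur.reverse ++ ·) := by
  intro fuel
  induction fuel with
  | zero => intro l cur acc h; omega
  | succ n ih =>
    intro l cur acc h
    cases l with
    | nil =>
      simp [PySem.Chars.splitOn.go, pvSp]
    | cons c rest =>
      rw [PySem.Chars.splitOn.go]
      by_cases hc : c = '<'
      · subst hc
        have hpre : List.isPrefixOf ['<'] ('<' :: rest) = true := by
          simp [List.isPrefixOf]
        simp only [hpre, if_pos, List.length_cons, List.length_nil, Nat.zero_add, List.drop_succ_cons, List.drop_zero]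
        rw [ih rest [] (List.reverse cur :: acc) (by simpa using Nat.lt_of_succ_lt_succ h)]
        obtain ⟨hh, tt, he⟩ := List.exists_cons_of_ne_nil (pvSp_ne_nil rest)
        simp [pvSp, he]
      · have hpre : List.isPrefixOf ['<'] (c :: rest) = false := by
          simp [List.isPrefixOf]
          exact fun hcc => absurd hcc.symm hc
        simp only [hpre, Bool.false_eq_true, if_neg, not_false_eq_true]
        rw [ih rest (c :: cur) acc (by simpa using Nat.lt_of_succ_lt_succ h)]
        obtain ⟨hh, tt, he⟩ := List.exists_cons_of_ne_nil (pvSp_ne_nil rest)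
        simp [pvSp, he, hc]

theorem pvSplitOn_eq_pvSp (cs : List Char) : PySem.Chars.splitOn cs ['<'] = pvSp cs := by
  rw [PySem.Chars.splitOn, pvGo_spec (cs.length + 1) cs [] [] (by omega)]
  obtain ⟨hh, tt, he⟩ := List.exists_cons_of_ne_nil (pvSp_ne_nil cs)
  simp [he]

theorem pvDecomp {p : List Char} (h : '>' ∈ p) :
    ∃ r, p = p.takeWhile pvNG ++ '>' :: r := by
  have hd : p.dropWhile pvNG ≠ [] := by
    intro hnil
    have := List.dropWhile_eq_nil_iff.1 hnil _ h
    simp [pvNG] at this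
  obtain ⟨c, t, hct⟩ := List.exists_cons_of_ne_nil hd
  have h2 := List.head_dropWhile_not pvNG hd
  simp only [hct, List.head_cons] at h2
  have hc : c = '>' := by simpa [pvNG] using h2
  refine ⟨t, ?_⟩
  conv_lhs => rw [← List.takeWhile_append_dropWhile (p := pvNG) (l := p)]
  rw [hct, hc]

theorem pvFind_gt_of_not_mem {p : List Char} (h : '>' ∉ p) :
    PySem.Chars.find p ['>'] = -1 := by
  rw [PySem.Chars.find_eq_neg_one_iff]
  simpa using (List.singleton_infix_iff '>' p).not.2 h

theorem pvFind_gt_of_mem {p : List Char} (h : '>' ∈ p) :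
    PySem.Chars.find p ['>'] = ((p.takeWhile pvNG).length : Int) := by
  have hnn : 0 ≤ PySem.Chars.find p ['>'] :=
    (PySem.Chars.find_nonneg_iff p ['>']).2 ((List.singleton_infix_iff '>' p).2 h)
  obtain ⟨hpre, hmin⟩ := PySem.Chars.find_spec hnn
  obtain ⟨r, hr⟩ := pvDecomp h
  set t := p.takeWhile pvNG with ht
  set n := (PySem.Chars.find p ['>']).toNat with hn
  have hle : n ≤ t.length := by
    by_contra hgt
    push_neg at hgt
    exact hmin _ hgt (by rw [hr, List.drop_left]; exact ⟨r, rfl⟩)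
  have hge : t.length ≤ n := by
    by_contra hgt
    push_neg at hgt
    obtain ⟨s, hs⟩ := hpre
    have hget : p[n]? = some '>' := by
      have := congrArg (·[0]?) hs
      simpa [List.getElem?_drop] using this.symm
    have hmem : '>' ∈ t := by
      have hg2 : t[n]? = some '>' := by
        rw [hr] at hget
        rwa [List.getElem?_append_left (by omega)] at hget
      exact List.mem_of_getElem? hg2
    have := List.mem_takeWhile_imp hmem
    simp [pvNG] at this
  have : n = t.length := le_antisymm hle hge
  omega

theorem pvTW_clean {seg : List Char} (h2 : '>' ∉ seg) (rest : List Char) :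
    List.takeWhile pvNG (seg ++ rest) = seg ++ List.takeWhile pvNG rest := by
  induction seg with
  | nil => simp
  | cons a s ih =>
    have ha : a ≠ '>' := fun he => h2 (he ▸ List.mem_cons_self)
    simp only [List.cons_append, List.takeWhile_cons]
    simp only [pvNG, ne_eq, ha, not_false_eq_true, decide_true, if_true]
    rw [ih (fun hm => h2 (List.mem_cons_of_mem _ hm))]

theorem pvRun_claims : ∀ (n : Nat) (cs : List Char), cs.length ≤ n →
    (pvRun none cs = (pvSp cs).tail.flatMap pvPW) ∧
    (∀ seg, '<' ∉ seg → '>' ∉ seg →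
      pvRun (some seg) cs = pvPW (seg ++ (pvSp cs).headI) ++ (pvSp cs).tail.flatMap pvPW) := by
  intro n
  induction n with
  | zero =>
    intro cs h
    have : cs = [] := List.eq_nil_of_length_eq_zero (by omega)
    subst this
    constructor
    · simp [pvRun, pvSp]
    · intro seg _ h2
      simp [pvRun, pvSp, pvPW, h2]
  | succ n ih =>
    intro cs h
    cases cs with
    | nil =>
      constructor
      · simp [pvRun, pvSp]
      · intro seg _ h2
        simp [pvRun, pvSp, pvPW, h2]
    | cons c r =>
      have hr : r.length ≤ n := by simpa using Nat.le_of_succ_le_succ h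
      obtain ⟨hh, tt, he⟩ := List.exists_cons_of_ne_nil (pvSp_ne_nil r)
      constructor
      · by_cases hc : c = '<'
        · subst hc
          have := ((ih r hr).2 [] (by simp) (by simp))
          simp only [pvRun, if_pos rfl, this, pvSp, he]
          simp [List.flatMap_cons]
        · by_cases hgt : c = '>'
          · subst hgt
            simp only [pvRun, if_neg hc, if_pos rfl]
            rw [(ih r hr).1]
            simp [pvSp, he, hc]
          · simp only [pvRun, if_neg hc, if_neg hgt, Option.map_none]
            rw [(ih r hr).1]
            simp [pvSp, he, hc]
      · intro seg h1 h2
        by_cases hc : c = '<'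
        · subst hc
          have := ((ih r hr).2 [] (by simp) (by simp))
          simp only [pvRun, if_pos rfl, this, pvSp, he]
          have hpw : pvPW seg = [] := by
            simp [pvPW, h2]
          simp [hpw, List.flatMap_cons]
        · by_cases hgt : c = '>'
          · subst hgt
            simp only [pvRun, if_neg hc, if_pos rfl]
            rw [(ih r hr).1]
            have hpw : pvPW (seg ++ (pvSp ('>' :: r)).headI) = ['<' :: seg ++ ['>']] := by
              simp only [pvSp, if_neg hc, he, List.modifyHead_cons, List.headI_cons]
              have : List.takeWhile pvNG (seg ++ '>' :: hh) = seg := by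
                rw [pvTW_clean h2]
                simp [List.takeWhile_cons, pvNG]
              rw [pvPW, if_pos (by simp : '>' ∈ seg ++ '>' :: hh)]
              rw [this]
            rw [hpw]
            simp [pvSp, he, hc]
          · simp only [pvRun, if_neg hc, if_neg hgt, Option.map_some]
            have hseg1 : '<' ∉ seg ++ [c] := by
              intro hm; rcases List.mem_append.1 hm with hm | hm
              · exact h1 hm
              · simp at hm; exact hc hm.symm
            have hseg2 : '>' ∉ seg ++ [c] := by
              intro hm; rcases List.mem_append.1 hm with hm | hm
              · exact h2 hm
              · simp at hm; exact hgt hm.symm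
            rw [(ih r hr).2 (seg ++ [c]) hseg1 hseg2]
            simp only [pvSp, if_neg hc, he, List.modifyHead_cons, List.headI_cons, List.tail_cons]
            simp

theorem pvRun_eq_sp (cs : List Char) :
    pvRun none cs = (pvSp cs).tail.flatMap pvPW :=
  (pvRun_claims cs.length cs le_rfl).1

theorem pvSlice_word (story : String) (pre' seg r : List Char)
    (hs : story.toList = pre' ++ '<' :: seg ++ '>' :: r) :
    PySem.Str.slice story (some (pre'.length : Int)) (some (((pre'.length + 1 + seg.length : Nat) : Int) + 1))
      = String.ofList ('<' :: seg ++ ['>']) := by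
  apply String.toList_inj.mp
  rw [PySem.Str.toList_slice, PySem.Chars.slice_eq_listSlice]
  have hb : (((pre'.length + 1 + seg.length : Nat) : Int) + 1) = ((pre'.length + 1 + seg.length + 1 : Nat) : Int) := by
    push_cast; ring
  rw [hb, PySem.List.slice_natCast, hs]
  rw [show List.drop pre'.length (pre' ++ '<' :: seg ++ '>' :: r) = '<' :: seg ++ '>' :: r from by simp]
  have h2 : pre'.length + 1 + seg.length + 1 - pre'.length = seg.length + 2 := by omega
  rw [h2]
  rw [show ('<' :: seg ++ '>' :: r) = ('<' :: seg ++ ['>']) ++ r from by simp]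
  rw [show seg.length + 2 = ('<' :: seg ++ ['>']).length from by simp, List.take_left]
  simp

theorem pvA_claims (story : String) : ∀ (n : Nat) (cs : List Char), cs.length ≤ n →
    (∀ (pre : List Char) (ws : PySem.Set String), story.toList = pre ++ cs →
      ((PySem.List.enumerate cs (pre.length : Int)).foldl (pvStepA story) (ws, -1)).1
        = PySem.Set.update ws ((pvRun none cs).map String.ofList)) ∧
    (∀ (pre' seg : List Char) (ws : PySem.Set String),
       story.toList = pre' ++ '<' :: seg ++ cs → '<' ∉ seg → '>' ∉ seg →
      ((PySem.List.enumerate cs ((pre'.length + 1 + seg.length : Nat) : Int)).foldl (pvStepA story) (ws, (pre'.length : Int))).1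
        = PySem.Set.update ws ((pvRun (some seg) cs).map String.ofList)) := by
  intro n
  induction n with
  | zero =>
    intro cs h
    have : cs = [] := List.eq_nil_of_length_eq_zero (by omega)
    subst this
    constructor
    · intro pre ws _; simp [PySem.List.enumerate, pvRun]
    · intro pre' seg ws _ _ _; simp [PySem.List.enumerate, pvRun]
  | succ n ih =>
    intro cs h
    cases cs with
    | nil =>
      constructor
      · intro pre ws _; simp [PySem.List.enumerate, pvRun]
      · intro pre' seg ws _ _ _; simp [PySem.List.enumerate, pvRun]
    | cons c r =>
      have hr : r.length ≤ n := by simpa using Nat.le_of_succ_le_succ h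
      constructor
      · intro pre ws hs
        rw [PySem.List.enumerate_cons, List.foldl_cons]
        by_cases hc : c = '<'
        · subst hc
          have hst : pvStepA story (ws, -1) ((pre.length : Int), '<') = (ws, (pre.length : Int)) := by
            simp [pvStepA]
          rw [hst]
          have hidx : (pre.length : Int) + 1 = ((pre.length + 1 + ([] : List Char).length : Nat) : Int) := by
            push_cast; simp
          rw [hidx]
          rw [(ih r hr).2 pre [] ws (by simpa using hs) (by simp) (by simp)]
          simp [pvRun]
        · have hst : pvStepA story (ws, -1) ((pre.length : Int), c) = (ws, -1) := by
            simp [pvStepA, hc]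
          rw [hst]
          have hidx : (pre.length : Int) + 1 = (((pre ++ [c]).length : Nat) : Int) := by
            push_cast; simp
          rw [hidx]
          rw [(ih r hr).1 (pre ++ [c]) ws (by simpa using hs)]
          have : pvRun none (c :: r) = pvRun none r := by
            by_cases hgt : c = '>' <;> simp [pvRun, hc, hgt]
          rw [this]
      · intro pre' seg ws hs h1 h2
        rw [PySem.List.enumerate_cons, List.foldl_cons]
        by_cases hc : c = '<'
        · subst hc
          have hst : pvStepA story (ws, (pre'.length : Int)) (((pre'.length + 1 + seg.length : Nat) : Int), '<')
              = (ws, ((pre'.length + 1 + seg.length : Nat) : Int)) := by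
            simp [pvStepA]
          rw [hst]
          have hidx1 : ((pre'.length + 1 + seg.length : Nat) : Int) = (((pre' ++ '<' :: seg).length : Nat) : Int) := by
            push_cast; simp; ring
          have hidx2 : ((pre'.length + 1 + seg.length : Nat) : Int) + 1
              = (((pre' ++ '<' :: seg).length + 1 + ([] : List Char).length : Nat) : Int) := by
            push_cast; simp; ring
          rw [hidx2]
          conv_lhs => rw [hidx1]
          rw [(ih r hr).2 (pre' ++ '<' :: seg) [] ws (by simpa using hs) (by simp) (by simp)]
          simp [pvRun]
        · by_cases hgt : c = '>'
          · subst hgt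
            have hne : ((pre'.length : Int)) ≠ -1 := by omega
            have hst : pvStepA story (ws, (pre'.length : Int)) (((pre'.length + 1 + seg.length : Nat) : Int), '>')
                = (PySem.Set.add ws (PySem.Str.slice story (some (pre'.length : Int)) (some (((pre'.length + 1 + seg.length : Nat) : Int) + 1))), -1) := by
              simp [pvStepA, hne]
            rw [hst]
            rw [pvSlice_word story pre' seg r (by simpa using hs)]
            have hidx : ((pre'.length + 1 + seg.length : Nat) : Int) + 1
                = (((pre' ++ '<' :: seg ++ ['>']).length : Nat) : Int) := by
              push_cast; simp; ring
            rw [hidx]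
            rw [(ih r hr).1 (pre' ++ '<' :: seg ++ ['>']) _ (by simp at hs ⊢; simpa using hs)]
            simp [pvRun, PySem.Set.update_cons]
          · have hst : pvStepA story (ws, (pre'.length : Int)) (((pre'.length + 1 + seg.length : Nat) : Int), c)
                = (ws, (pre'.length : Int)) := by
              simp [pvStepA, hc, hgt]
            rw [hst]
            have hidx : ((pre'.length + 1 + seg.length : Nat) : Int) + 1
                = ((pre'.length + 1 + (seg ++ [c]).length : Nat) : Int) := by
              push_cast; simp; ring
            rw [hidx]
            have hseg1 : '<' ∉ seg ++ [c] := by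
              intro hm; rcases List.mem_append.1 hm with hm | hm
              · exact h1 hm
              · simp at hm; exact hc hm.symm
            have hseg2 : '>' ∉ seg ++ [c] := by
              intro hm; rcases List.mem_append.1 hm with hm | hm
              · exact h2 hm
              · simp at hm; exact hgt hm.symm
            rw [(ih r hr).2 pre' (seg ++ [c]) ws (by simp at hs ⊢; simpa using hs) hseg1 hseg2]
            have : pvRun (some seg) (c :: r) = pvRun (some (seg ++ [c])) r := by
              simp [pvRun, hc, hgt]
            rw [this]

theorem pvA_eq_run (story : String) :
    extract_placeholders story = PySem.Set.update PySem.Set.empty ((pvRun none story.toList).map String.ofList) := by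
  rw [extract_placeholders]
  have h0 : (0 : Int) = ((([] : List Char).length : Nat) : Int) := by simp
  rw [h0]
  exact (pvA_claims story story.toList.length story.toList le_rfl).1 [] PySem.Set.empty (by simp)

theorem pvStepB_eq (ws : PySem.Set String) (piece : String) :
    pvStepB ws piece = PySem.Set.update ws ((pvPW piece.toList).map String.ofList) := by
  by_cases h : '>' ∈ piece.toList
  · have hfind : PySem.Str.find piece ">" = ((piece.toList.takeWhile pvNG).length : Int) := by
      rw [PySem.Str.find_eq, show (">" : String).toList = ['>'] from by decide, pvFind_gt_of_mem h]
    obtain ⟨r, hr⟩ := pvDecomp h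
    set t := piece.toList.takeWhile pvNG with htdef
    have hword : ("<" ++ PySem.Str.slice piece none (some (((t.length : Int)) + 1)))
        = String.ofList ('<' :: t ++ ['>']) := by
      apply String.toList_inj.mp
      rw [String.toList_append, show ("<" : String).toList = ['<'] from by decide]
      rw [PySem.Str.toList_slice, PySem.Chars.slice_eq_listSlice]
      rw [show ((t.length : Int) + 1) = ((t.length + 1 : Nat) : Int) from by push_cast; ring]
      have hsl := PySem.List.slice_to piece.toList (b := ((t.length + 1 : Nat) : Int)) (by omega)
      rw [hsl, Int.toNat_natCast, hr, List.take_append]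
      simp
    rw [pvStepB, hfind]
    have hne : ((t.length : Int)) ≠ -1 := by omega
    simp only [hne, ne_eq, not_false_eq_true, if_pos]
    rw [hword]
    rw [pvPW, if_pos h, ← htdef]
    simp [PySem.Set.update_cons, PySem.Set.update_nil]
  · have hfind : PySem.Str.find piece ">" = -1 := by
      rw [PySem.Str.find_eq, show (">" : String).toList = ['>'] from by decide, pvFind_gt_of_not_mem h]
    rw [pvStepB, hfind]
    simp [pvPW, h, PySem.Set.update_nil]

theorem pvFold_stepB (l : List String) : ∀ (ws : PySem.Set String),
    l.foldl pvStepB ws = PySem.Set.update ws (l.flatMap (fun piece => (pvPW piece.toList).map String.ofList)) := by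
  induction l with
  | nil => intro ws; simp [PySem.Set.update_nil]
  | cons p l ih =>
    intro ws
    rw [List.foldl_cons, ih, pvStepB_eq]
    simp [PySem.Set.update]

theorem pvB_eq_sp (story : String) :
    extract_placeholders_alt story
      = PySem.Set.update PySem.Set.empty (((pvSp story.toList).tail.flatMap pvPW).map String.ofList) := by
  have hsplit : Option.map (List.map String.toList) (PySem.Str.split? story "<")
      = some (pvSp story.toList) := by
    rw [PySem.Str.split?_map, show ("<" : String).toList = ['<'] from by decide]
    rw [PySem.Chars.split?]
    simp [pvSplitOn_eq_pvSp]
  obtain ⟨ps, hps, hmap⟩ := Option.map_eq_some_iff.1 hsplit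
  rw [extract_placeholders_alt, hps]
  simp only [Option.getD_some]
  rw [PySem.List.slice_from_one]
  rw [pvFold_stepB]
  congr 1
  have htail : ps.tail.map String.toList = (pvSp story.toList).tail := by
    rw [← hmap, List.map_tail]
  rw [← htail, List.flatMap_map, List.map_flatMap]

-- ===== VERDICT (by name: the statement is the Claim_ definition above) =====
theorem extract_placeholders_spec : Claim_equal_extract_placeholders := by
  intro story _
  unfold Spec_extract_placeholders
  rw [pvA_eq_run, pvB_eq_sp, pvRun_eq_sp]
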